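-- pv_equiv track=rewrite | github.com/roshgill/table_extraction_medical | shared/table_validator.py | _effective_cols
-- ===== SOURCE A (Python) =====
-- def _effective_cols(row_cells, row_span_info):
--     """Sum of colspans for a row."""
--     total = 0
--     for idx, _text in enumerate(row_cells):
--         if idx < len(row_span_info):
--             cs, _ = row_span_info[idx]
--             total += cs
--         else:
--             total += 1
--     return total
-- ===== SOURCE B (Python) =====
-- def _effective_cols(row_cells, row_span_info):
--     """Sum of colspans for a row."""
--     n = sum(1 for _ in row_cells)          # count cells (works for any iterable)
--     k = min(n, len(row_span_info))
--     return sum(cs for cs, _ in row_span_info[:k]) + (n - k)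
-- ===== Notes on version B (the rewrite author's own statement) =====
-- stated objective: alternative
-- what changed: Replaces the per-cell loop with its if-branch and default 1 by a staged closed form: count the cells once, prefix-sum the first min(n, len(row_span_info)) colspans via a slice, and add the (n - k) uncovered cells arithmetically.
import Mathlib
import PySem

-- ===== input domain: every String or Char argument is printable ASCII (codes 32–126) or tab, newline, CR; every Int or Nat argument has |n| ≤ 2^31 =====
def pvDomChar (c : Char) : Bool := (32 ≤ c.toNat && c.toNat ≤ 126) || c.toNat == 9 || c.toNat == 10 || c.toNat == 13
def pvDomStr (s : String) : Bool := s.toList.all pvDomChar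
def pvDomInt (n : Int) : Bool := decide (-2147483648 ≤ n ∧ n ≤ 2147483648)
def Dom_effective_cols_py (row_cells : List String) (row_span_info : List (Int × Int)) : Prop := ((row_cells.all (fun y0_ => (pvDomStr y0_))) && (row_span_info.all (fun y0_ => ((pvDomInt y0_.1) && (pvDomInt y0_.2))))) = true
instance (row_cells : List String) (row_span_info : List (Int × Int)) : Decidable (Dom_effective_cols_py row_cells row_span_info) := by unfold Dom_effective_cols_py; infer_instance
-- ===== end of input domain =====

-- B replaces A's per-cell loop (if idx < len: add row_span_info[idx] else add 1) by a staged
-- closed form: count the cells, prefix-sum the first min(n, len(spans)) colspans, add n - k.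


-- ===== PORT A =====
-- the for-loop over enumerate(row_cells): idx counts up, total accumulates
def effColsLoopA (row_span_info : List (Int × Int)) : Nat → List String → Int → Int
  | _, [], total => total
  | idx, _ :: rest, total =>
    if idx < row_span_info.length then
      effColsLoopA row_span_info (idx + 1) rest (total + (row_span_info.getD idx (0, 0)).1)
    else
      effColsLoopA row_span_info (idx + 1) rest (total + 1)

def effective_cols_py (row_cells : List String) (row_span_info : List (Int × Int)) : Int :=
  effColsLoopA row_span_info 0 row_cells 0

-- ===== PORT B =====
-- B: n = count of cells; k = min(n, len(row_span_info)); sum of the first k colspans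
-- (row_span_info[:k] → List.take) plus the n - k uncovered cells, arithmetically.
def effective_cols_py_alt (row_cells : List String) (row_span_info : List (Int × Int)) : Int :=
  let n := row_cells.length
  let k := min n row_span_info.length
  ((row_span_info.take k).map Prod.fst).sum + ((n : Int) - (k : Int))

-- ===== PRECONDITION & SPEC =====
def Spec_effective_cols_py (row_cells : List String) (row_span_info : List (Int × Int)) (out : Int) : Prop := out = effective_cols_py_alt row_cells row_span_info
instance (row_cells : List String) (row_span_info : List (Int × Int)) (out : Int) : Decidable (Spec_effective_cols_py row_cells row_span_info out) := by unfold Spec_effective_cols_py; infer_instance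

-- ===== CLAIM (what is proved, stated in full; the proofs are below) =====
def Claim_equal_effective_cols_py : Prop := ∀ (row_cells : List String) (row_span_info : List (Int × Int)), Dom_effective_cols_py row_cells row_span_info → Spec_effective_cols_py row_cells row_span_info (effective_cols_py row_cells row_span_info)

-- ===== LEMMAS AND PROOFS =====

theorem effColsLoopA_eq (row_span_info : List (Int × Int)) (rc : List String)
    (idx : Nat) (total : Int) :
    effColsLoopA row_span_info idx rc total =
      total + (((row_span_info.drop idx).take rc.length).map Prod.fst).sum
        + ((rc.length : Int) - (min rc.length (row_span_info.length - idx) : Nat)) := by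
  induction rc generalizing idx total with
  | nil => simp [effColsLoopA]
  | cons c cs ih =>
    by_cases h : idx < row_span_info.length
    · have hd : row_span_info.drop idx = row_span_info.getD idx (0, 0) :: row_span_info.drop (idx + 1) := by
        rw [List.getD_eq_getElem _ _ h]
        exact List.drop_eq_getElem_cons h
      simp only [effColsLoopA, if_pos h, ih, hd, List.length_cons, List.take_succ_cons,
        List.map_cons, List.sum_cons]
      have hm : min (cs.length + 1) (row_span_info.length - idx)
          = min cs.length (row_span_info.length - (idx + 1)) + 1 := by omega
      rw [hm]
      push_cast
      ring
    · have hd : row_span_info.drop idx = [] := List.drop_eq_nil_of_le (by omega)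
      have hd' : row_span_info.drop (idx + 1) = [] := List.drop_eq_nil_of_le (by omega)
      simp only [effColsLoopA, if_neg h, ih, hd, hd', List.take_nil, List.map_nil, List.sum_nil]
      have h0 : row_span_info.length - idx = 0 := by omega
      have h0' : row_span_info.length - (idx + 1) = 0 := by omega
      rw [h0, h0', Nat.min_zero, Nat.min_zero]
      simp only [List.length_cons]
      push_cast
      ring

-- ===== VERDICT (by name: the statement is the Claim_ definition above) =====
theorem effective_cols_py_spec : Claim_equal_effective_cols_py := by
  intro rc rsi _
  show effective_cols_py rc rsi = effective_cols_py_alt rc rsi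
  rw [effective_cols_py, effColsLoopA_eq]
  simp only [effective_cols_py_alt, List.drop_zero, Nat.sub_zero]
  have htake : rsi.take (min rc.length rsi.length) = rsi.take rc.length := by
    by_cases h : rc.length ≤ rsi.length
    · rw [min_eq_left h]
    · rw [min_eq_right (by omega), List.take_length,
        List.take_of_length_le (by omega)]
  rw [htake]
  ring
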